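-- pv_equiv track=rewrite | github.com/lymchgmk/Algorithm-Problem-Solving | Progammers/코딩테스트/2021 네이버웹툰 개발 챌린지/프로그래밍 3.py | solution
-- ===== SOURCE A (Python) =====
-- from collections import Counter
--
-- def solution(letters, k):
--     _sorted = sorted(letters, reverse=True)[:k]
--     _Counter = Counter(_sorted)
--     answer = ''
--     for i in range(len(letters)-1, -1, -1):
--         letter = letters[i]
--         if _Counter[letter]:
--             answer = letter + answer
--             _Counter[letter] -= 1
--     return answer
-- ===== SOURCE B (Python) =====
-- from collections import Counter
--
-- def solution(letters, k):
--     n = len(letters)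
--     # how many characters must be dropped (slice semantics of letters-sorted[:k])
--     d = max(n - k, 0) if k >= 0 else min(-k, n)
--     cnt = Counter(letters)
--     drop = {}
--     for c in sorted(cnt):          # ascending: drop the smallest chars first
--         drop[c] = min(cnt[c], d)
--         d -= drop[c]
--     out = []
--     for c in letters:
--         if drop[c] > 0:            # drop leftmost occurrences of each char
--             drop[c] -= 1
--         else:
--             out.append(c)
--     return ''.join(out)
-- ===== Notes on version B (the rewrite author's own statement) =====
-- stated objective: faster
-- what changed: Instead of fully sorting the string, taking the top-k prefix and scanning right-to-left with per-char keep quotas (prepending to a string, which is quadratic), B counts character frequencies once, allocates the n-k drops greedily to the smallest characters (sorting only the distinct characters), and does one left-to-right pass appending kept characters.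
import Mathlib
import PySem

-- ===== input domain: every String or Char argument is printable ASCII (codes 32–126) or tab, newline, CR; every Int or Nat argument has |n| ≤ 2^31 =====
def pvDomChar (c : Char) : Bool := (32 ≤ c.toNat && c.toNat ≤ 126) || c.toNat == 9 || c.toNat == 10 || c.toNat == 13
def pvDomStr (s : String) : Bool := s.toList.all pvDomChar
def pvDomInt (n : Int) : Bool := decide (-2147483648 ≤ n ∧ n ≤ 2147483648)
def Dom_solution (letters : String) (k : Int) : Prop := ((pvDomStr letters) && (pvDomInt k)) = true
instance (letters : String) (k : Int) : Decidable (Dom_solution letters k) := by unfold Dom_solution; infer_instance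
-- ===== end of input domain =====

-- B keeps the k largest characters (original order) without a full sort and without quadratic
-- string prepending: count frequencies, assign the n-k drops to the smallest characters, one
-- forward pass.  Objective: faster (asymptotic; timing run confirms).

-- ===== PORT A =====
def solution (letters : String) (k : Int) : String :=
  let lst := letters.toList
  let _sorted := PySem.List.slice (PySem.List.sorted lst (fun x => x) true) none (some k)
  let _Counter := PySem.Dict.counter _sorted
  let st := (PySem.List.pyRange ((lst.length : Int) - 1) (-1) (-1)).foldl
    (fun (st : PySem.Dict Char Int × List Char) i =>
      let letter := PySem.List.pyGetD lst i ' '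
      if st.1.getD letter 0 ≠ 0 then
        (st.1.modify letter 0 (· - 1), letter :: st.2)
      else st)
    (_Counter, [])
  String.ofList st.2

-- ===== PORT B =====
def solution_alt (letters : String) (k : Int) : String :=
  let lst := letters.toList
  let n : Int := lst.length
  let d : Int := if 0 ≤ k then max (n - k) 0 else min (-k) n
  let cnt := PySem.Dict.counter lst
  let dropSt := (PySem.List.sorted cnt.keys (fun x => x) false).foldl
    (fun (st : PySem.Dict Char Int × Int) c =>
      let q := min (cnt.getD c 0) st.2
      (st.1.insert c q, st.2 - q))
    (PySem.Dict.empty, d)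
  let out := lst.foldl
    (fun (st : PySem.Dict Char Int × List Char) c =>
      if 0 < st.1.getD c 0 then (st.1.modify c 0 (· - 1), st.2)
      else (st.1, st.2 ++ [c]))
    (dropSt.1, [])
  String.ofList out.2

-- ===== PRECONDITION & SPEC =====
def Spec_solution (letters : String) (k : Int) (out : String) : Prop := out = solution_alt letters k
instance (letters : String) (k : Int) (out : String) : Decidable (Spec_solution letters k out) := by unfold Spec_solution; infer_instance

-- ===== CLAIM (what is proved, stated in full; the proofs are below) =====
def Claim_equal_solution : Prop := ∀ (letters : String) (k : Int), Dom_solution letters k → Spec_solution letters k (solution letters k)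

-- ===== LEMMAS AND PROOFS =====

-- A's right-to-left keep-with-quota loop, abstracted over a functional counter.
def keepA : List Char → (Char → Int) → (Char → Int) × List Char
  | [], C => (C, [])
  | x :: xs, C =>
    let r := keepA xs C
    if r.1 x ≠ 0 then (fun c => if c = x then r.1 x - 1 else r.1 c, x :: r.2)
    else r

-- B's left-to-right drop loop, abstracted over a functional drop budget.
def dropB : List Char → (Char → Int) → List Char
  | [], _ => []
  | x :: xs, D =>
    if 0 < D x then dropB xs (fun c => if c = x then D x - 1 else D c)
    else x :: dropB xs D

theorem dropB_congr (xs : List Char) (f g : Char → Int)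
    (h : ∀ c ∈ xs, f c = g c) : dropB xs f = dropB xs g := by
  induction xs generalizing f g with
  | nil => rfl
  | cons x xs ih =>
    have hx : f x = g x := h x (by simp)
    simp only [dropB, hx]
    by_cases hpos : 0 < g x
    · simp only [if_pos hpos]
      exact ih _ _ (fun c hc => by by_cases hcx : c = x <;> simp [hcx, hx, h c (List.mem_cons_of_mem _ hc)])
    · simp only [if_neg hpos]
      exact congrArg _ (ih _ _ (fun c hc => h c (List.mem_cons_of_mem _ hc)))

-- Core: keeping quota C scanning from the right = dropping (count - C) from the left.
theorem keepA_eq_dropB (xs : List Char) (C : Char → Int) (h : ∀ c, 0 ≤ C c) :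
    ((keepA xs C).1 = fun c => max (C c - xs.count c) 0) ∧
    (keepA xs C).2 = dropB xs (fun c => max ((xs.count c : Int) - C c) 0) := by
  induction xs with
  | nil =>
    refine ⟨funext fun c => ?_, rfl⟩
    have := h c; simp [keepA]; omega
  | cons x xs ih =>
    obtain ⟨ih1, ih2⟩ := ih
    have hr1 : (keepA xs C).1 x = max (C x - xs.count x) 0 := by rw [ih1]
    by_cases hx : (xs.count x : Int) < C x
    · have hne : (keepA xs C).1 x ≠ 0 := by rw [hr1]; omega
      have hD : ¬ 0 < max ((((x :: xs).count x : Nat) : Int) - C x) 0 := by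
        simp only [List.count_cons_self]; push_cast; omega
      refine ⟨funext fun c => ?_, ?_⟩
      · have ihc : (keepA xs C).1 c = max (C c - xs.count c) 0 := by rw [ih1]
        show (if (keepA xs C).1 x ≠ 0 then
            (fun c => if c = x then (keepA xs C).1 x - 1 else (keepA xs C).1 c, x :: (keepA xs C).2)
          else keepA xs C).1 c = max (C c - (x :: xs).count c) 0
        rw [if_pos hne]
        by_cases hcx : c = x
        · subst hcx; simp only [if_pos rfl, hr1, List.count_cons_self]; push_cast; omega
        · simp only [if_neg hcx, ihc, List.count_cons_of_ne (fun e => hcx e.symm)]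
      · show (if (keepA xs C).1 x ≠ 0 then
            (fun c => if c = x then (keepA xs C).1 x - 1 else (keepA xs C).1 c, x :: (keepA xs C).2)
          else keepA xs C).2 = dropB (x :: xs) (fun c => max (((x :: xs).count c : Int) - C c) 0)
        rw [if_pos hne]
        simp only [dropB, if_neg hD]
        refine congrArg (x :: ·) (ih2.trans (dropB_congr _ _ _ fun c _ => ?_))
        by_cases hcx : c = x
        · subst hcx; simp only [List.count_cons_self]; push_cast; omega
        · simp only [List.count_cons_of_ne (fun e => hcx e.symm)]
    · have heq0 : (keepA xs C).1 x = 0 := by rw [hr1]; have := h x; omega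
      have hnot : ¬ ((keepA xs C).1 x ≠ 0) := fun hne => hne heq0
      have hD : 0 < max ((((x :: xs).count x : Nat) : Int) - C x) 0 := by
        simp only [List.count_cons_self]; push_cast; omega
      refine ⟨funext fun c => ?_, ?_⟩
      · have ihc : (keepA xs C).1 c = max (C c - xs.count c) 0 := by rw [ih1]
        show (if (keepA xs C).1 x ≠ 0 then
            (fun c => if c = x then (keepA xs C).1 x - 1 else (keepA xs C).1 c, x :: (keepA xs C).2)
          else keepA xs C).1 c = max (C c - (x :: xs).count c) 0
        rw [if_neg hnot, ihc]
        by_cases hcx : c = x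
        · subst hcx; simp only [List.count_cons_self]; have := h c; push_cast; omega
        · simp only [List.count_cons_of_ne (fun e => hcx e.symm)]
      · show (if (keepA xs C).1 x ≠ 0 then
            (fun c => if c = x then (keepA xs C).1 x - 1 else (keepA xs C).1 c, x :: (keepA xs C).2)
          else keepA xs C).2 = dropB (x :: xs) (fun c => max (((x :: xs).count c : Int) - C c) 0)
        rw [if_neg hnot]
        simp only [dropB, if_pos hD]
        refine ih2.trans (dropB_congr _ _ _ fun c _ => ?_)
        by_cases hcx : c = x
        · subst hcx; simp only [if_pos rfl, List.count_cons_self]; push_cast; omega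
        · simp only [if_neg hcx, List.count_cons_of_ne (fun e => hcx e.symm)]

-- Bridge: A's dict loop = keepA.
theorem A_loop_eq_keepA (xs : List Char) (d : PySem.Dict Char Int) :
    (∀ c, ((xs.foldr (fun c st => if st.1.getD c 0 ≠ 0 then (st.1.modify c 0 (· - 1), c :: st.2) else st)
        ((d, ([] : List Char)))).1).getD c 0 = (keepA xs (fun c => d.getD c 0)).1 c) ∧
    (xs.foldr (fun c st => if st.1.getD c 0 ≠ 0 then (st.1.modify c 0 (· - 1), c :: st.2) else st)
        ((d, ([] : List Char)))).2 = (keepA xs (fun c => d.getD c 0)).2 := by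
  induction xs with
  | nil => exact ⟨fun c => rfl, rfl⟩
  | cons x xs ih =>
    obtain ⟨ih1, ih2⟩ := ih
    simp only [List.foldr_cons, keepA]
    by_cases hx : (keepA xs (fun c => d.getD c 0)).1 x ≠ 0
    · have hx' := ih1 x
      rw [if_pos (by rw [hx']; exact hx), if_pos hx]
      refine ⟨fun c => ?_, by rw [ih2]⟩
      change _ = if c = x then _ else _
      rw [PySem.Dict.getD_modify]
      by_cases hcx : c = x
      · rw [if_pos hcx, if_pos hcx, ih1 x]
      · rw [if_neg hcx, if_neg hcx, ih1 c]
    · rw [if_neg (by rw [ih1 x]; exact hx), if_neg hx]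
      exact ⟨ih1, ih2⟩

-- Bridge: B's forward loop = dropB.
theorem B_loop_eq_dropB (xs : List Char) (D0 : PySem.Dict Char Int) (acc : List Char) :
    (xs.foldl (fun (st : PySem.Dict Char Int × List Char) c =>
        if 0 < st.1.getD c 0 then (st.1.modify c 0 (· - 1), st.2) else (st.1, st.2 ++ [c]))
      (D0, acc)).2 = acc ++ dropB xs (fun c => D0.getD c 0) := by
  induction xs generalizing D0 acc with
  | nil => simp [dropB]
  | cons x xs ih =>
    simp only [List.foldl_cons]
    by_cases hx : 0 < D0.getD x 0
    · rw [if_pos hx]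
      simp only [dropB, if_pos hx]
      rw [ih]
      refine congrArg (acc ++ ·) (dropB_congr _ _ _ fun c _ => ?_)
      rw [PySem.Dict.getD_modify]
    · rw [if_neg hx]
      simp only [dropB, if_neg hx]
      rw [ih]; simp


-- Count of c in the first m elements of a descending-sorted list, in closed form.
theorem count_take_sorted :
    ∀ (s : List Char), s.Pairwise (fun a b => b ≤ a) → ∀ (m : Nat) (c : Char),
      (s.take m).count c = min (s.count c) (m - s.countP (fun x => decide (c < x))) := by
  intro s
  induction s with
  | nil => intro _ m c; simp
  | cons x s ih =>
    intro hs m c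
    have hx : ∀ y ∈ s, y ≤ x := (List.pairwise_cons.mp hs).1
    have ihm := ih (List.pairwise_cons.mp hs).2
    cases m with
    | zero => simp
    | succ m =>
      rw [List.take_succ_cons, List.count_cons, List.count_cons, List.countP_cons, ihm m c]
      rcases lt_trichotomy x c with h | h | h
      · have hcnt : s.count c = 0 :=
          List.count_eq_zero.mpr (fun hc => absurd (hx c hc) (not_le.mpr h))
        have hg : s.countP (fun y => decide (c < y)) = 0 :=
          List.countP_eq_zero.mpr (fun y hy hcy =>
            absurd ((decide_eq_true_eq.mp hcy).trans_le (hx y hy)) (lt_asymm h))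
        have hxc : (x == c) = false := beq_eq_false_iff_ne.mpr (ne_of_lt h)
        have hdec : decide (c < x) = false := by simp [lt_asymm h]
        rw [hcnt, hg, hxc, hdec]
        simp
      · subst h
        have hg : s.countP (fun y => decide (x < y)) = 0 :=
          List.countP_eq_zero.mpr (fun y hy hcy =>
            absurd (decide_eq_true_eq.mp hcy) (not_lt.mpr (hx y hy)))
        rw [hg]
        simp
        try omega
      · have hxc : (x == c) = false := beq_eq_false_iff_ne.mpr (ne_of_gt h)
        have hdec : decide (c < x) = true := decide_eq_true h
        rw [hxc, hdec]
        simp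
        try omega

-- In a strictly ascending list, the elements before c are exactly those below c.
theorem takeWhile_ne_eq_filter_lt :
    ∀ (ks : List Char), ks.Pairwise (· < ·) → ∀ c ∈ ks,
      ks.takeWhile (fun u => u != c) = ks.filter (fun u => decide (u < c)) := by
  intro ks
  induction ks with
  | nil => simp
  | cons x ks ih =>
    intro hp c hc
    have hx : ∀ y ∈ ks, x < y := (List.pairwise_cons.mp hp).1
    have hp' := (List.pairwise_cons.mp hp).2
    by_cases hxc : x = c
    · subst hxc
      rw [List.takeWhile_cons_of_neg (by simp), List.filter_cons_of_neg (by simp)]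
      exact (List.filter_eq_nil_iff.mpr (fun y hy hlt =>
        absurd (decide_eq_true_eq.mp hlt) (lt_asymm (hx y hy)))).symm
    · have hc' : c ∈ ks := by
        cases List.mem_cons.mp hc with
        | inl h => exact absurd h.symm hxc
        | inr h => exact h
      have hxltc : x < c := hx c hc'
      simp only [List.takeWhile_cons, List.filter_cons]
      rw [if_pos (by simp [bne]; exact hxc), if_pos (by simp [hxltc])]
      rw [ih hp' c hc']

-- Σ_{u ∈ us} count u lst = countP (· ∈ us) lst, for distinct us.
theorem countP_mem_cons (u : Char) (us : List Char) (hu : u ∉ us) :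
    ∀ lst : List Char,
      lst.countP (fun x => decide (x ∈ u :: us)) = lst.count u + lst.countP (fun x => decide (x ∈ us)) := by
  intro lst
  induction lst with
  | nil => simp
  | cons y l ih =>
    simp only [List.countP_cons, List.count_cons, ih]
    by_cases hyu : y = u
    · subst hyu
      simp [hu]
      omega
    · by_cases hyus : y ∈ us <;> simp [hyu, hyus] <;> omega

theorem sum_count_eq_countP :
    ∀ (us : List Char), us.Nodup → ∀ lst : List Char,
      ((us.map (fun u => ((lst.count u : Nat) : Int))).sum)
        = ((lst.countP (fun x => decide (x ∈ us)) : Nat) : Int) := by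
  intro us
  induction us with
  | nil => intro _ lst; simp
  | cons u us ih =>
    intro hnd lst
    have hu : u ∉ us := (List.nodup_cons.mp hnd).1
    have ih' := ih (List.nodup_cons.mp hnd).2 lst
    rw [List.map_cons, List.sum_cons, ih', countP_mem_cons u us hu lst]
    push_cast
    ring

-- Trichotomy partition of a list's length by comparison with c.
theorem countP_tri (lst : List Char) (c : Char) :
    lst.countP (fun x => decide (x < c)) + lst.count c + lst.countP (fun x => decide (c < x)) = lst.length := by
  induction lst with
  | nil => simp
  | cons y l ih =>
    simp only [List.countP_cons, List.count_cons, List.length_cons]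
    rcases lt_trichotomy y c with h | h | h
    · simp [h, ne_of_lt h, lt_asymm h]
      omega
    · subst h
      simp
      omega
    · simp [h, ne_of_gt h, lt_asymm h]
      omega

-- A's countdown-indexed foldl is a foldr over the list.
theorem A_range_loop {β : Type} (xs : List Char) (f : β → Char → β) (init : β) :
    (PySem.List.pyRange ((xs.length : Int) - 1) (-1) (-1)).foldl
        (fun st i => f st (PySem.List.pyGetD xs i ' ')) init
      = xs.foldr (fun c st => f st c) init := by
  rw [PySem.List.pyRange_neg_one_eq_reverse]
  have h1 : (-1 : Int) + 1 = 0 := by norm_num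
  have h2 : ((xs.length : Int) - 1) + 1 = (xs.length : Int) := by ring
  rw [h1, h2, List.foldl_reverse]
  conv_rhs => rw [← PySem.List.map_pyGetD_pyRange_zero' xs ' ']
  rw [List.foldr_map]

-- Values already inserted are untouched by the rest of B's quota loop.
theorem greedy_pres (cnt : PySem.Dict Char Int) :
    ∀ (ks : List Char) (st0 : PySem.Dict Char Int × Int) (x : Char), x ∉ ks →
      ((ks.foldl (fun (st : PySem.Dict Char Int × Int) c =>
          (st.1.insert c (min (cnt.getD c 0) st.2), st.2 - min (cnt.getD c 0) st.2)) st0).1).getD x 0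
        = st0.1.getD x 0 := by
  intro ks
  induction ks with
  | nil => intro st0 x _; rfl
  | cons y ks ih =>
    intro st0 x hx
    have hxy : x ≠ y := fun h => hx (h ▸ List.mem_cons_self)
    have hxks : x ∉ ks := fun h => hx (List.mem_cons_of_mem _ h)
    rw [List.foldl_cons, ih _ x hxks]
    exact PySem.Dict.getD_insert_of_ne _ _ _ hxy

-- Closed form of B's greedy drop allocation.
theorem greedy_getD (cnt : PySem.Dict Char Int) (hc : ∀ u, 0 ≤ cnt.getD u 0) :
    ∀ (ks : List Char), ks.Nodup → ∀ (acc : PySem.Dict Char Int) (b : Int), 0 ≤ b → ∀ c ∈ ks,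
      ((ks.foldl (fun (st : PySem.Dict Char Int × Int) c =>
          (st.1.insert c (min (cnt.getD c 0) st.2), st.2 - min (cnt.getD c 0) st.2)) (acc, b)).1).getD c 0
        = min (cnt.getD c 0)
            (max (b - ((ks.takeWhile (fun u => u != c)).map (fun u => cnt.getD u 0)).sum) 0) := by
  intro ks
  induction ks with
  | nil => intro _ _ _ _ c hc'; exact absurd hc' (List.not_mem_nil)
  | cons x ks ih =>
    intro hnd acc b hb c hcmem
    have hxks : x ∉ ks := (List.nodup_cons.mp hnd).1
    have hnd' := (List.nodup_cons.mp hnd).2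
    rw [List.foldl_cons]
    by_cases hcx : c = x
    · subst hcx
      rw [greedy_pres cnt ks _ c hxks]
      simp only [PySem.Dict.getD_insert_self]
      rw [List.takeWhile_cons_of_neg (by simp)]
      simp only [List.map_nil, List.sum_nil]
      omega
    · have hcks : c ∈ ks := by
        cases List.mem_cons.mp hcmem with
        | inl h => exact absurd h hcx
        | inr h => exact h
      have hq0 : 0 ≤ min (cnt.getD x 0) b := le_min (hc x) hb
      have hb' : 0 ≤ b - min (cnt.getD x 0) b := by omega
      rw [ih hnd' _ _ hb' c hcks]
      rw [List.takeWhile_cons_of_pos (by simp [bne]; exact fun h => hcx h.symm)]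
      simp only [List.map_cons, List.sum_cons]
      have hS : 0 ≤ ((ks.takeWhile (fun u => u != c)).map (fun u => cnt.getD u 0)).sum :=
        List.sum_nonneg (by
          intro v hv
          obtain ⟨u, _, rfl⟩ := List.mem_map.mp hv
          exact hc u)
      have hcx0 := hc x
      omega


theorem solution_eq (letters : String) (k : Int) :
    solution letters k = solution_alt letters k := by
  simp only [solution, solution_alt]
  refine congrArg String.ofList ?_
  rw [A_range_loop (β := PySem.Dict Char Int × List Char) letters.toList
      (fun st c => if st.1.getD c 0 ≠ 0 then (st.1.modify c 0 (· - 1), c :: st.2) else st)]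
  rw [(A_loop_eq_keepA letters.toList
      (PySem.Dict.counter (PySem.List.slice
        (PySem.List.sorted letters.toList (fun x => x) true) none (some k)))).2]
  rw [(keepA_eq_dropB letters.toList _ (fun c => by
      rw [PySem.Dict.getD_counter]; exact Int.natCast_nonneg _)).2]
  rw [B_loop_eq_dropB, List.nil_append]
  refine dropB_congr _ _ _ (fun c hc => ?_)
  have hdesc : (PySem.List.sorted letters.toList (fun x => x) true).Pairwise
      (fun a b => b ≤ a) := PySem.List.sorted_pairwise_rev letters.toList (fun x => x)
  have hkeys : (PySem.Dict.counter letters.toList).keys = PySem.Set.ofList letters.toList :=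
    PySem.Dict.keys_counter _
  have hpair : (PySem.List.sorted (PySem.Dict.counter letters.toList).keys (fun x => x) false).Pairwise
      (· < ·) := by rw [hkeys]; exact PySem.List.sorted_ofList_pairwise_lt _
  have hmem : ∀ u : Char,
      u ∈ PySem.List.sorted (PySem.Dict.counter letters.toList).keys (fun x => x) false ↔
        u ∈ letters.toList := fun u => by
    rw [PySem.List.mem_sorted, hkeys, PySem.Set.mem_ofList]
  have hnd : (PySem.List.sorted (PySem.Dict.counter letters.toList).keys (fun x => x) false).Nodup :=
    hpair.imp ne_of_lt
  have hck : c ∈ PySem.List.sorted (PySem.Dict.counter letters.toList).keys (fun x => x) false :=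
    (hmem c).mpr hc
  have hlenn : (0 : Int) ≤ (letters.toList.length : Int) := Int.natCast_nonneg _
  have hd0 : 0 ≤ (if 0 ≤ k then max ((letters.toList.length : Int) - k) 0
      else min (-k) (letters.toList.length : Int)) := by
    split_ifs with hk
    · exact le_max_right _ _
    · omega
  rw [greedy_getD (PySem.Dict.counter letters.toList)
      (fun u => by rw [PySem.Dict.getD_counter]; exact Int.natCast_nonneg _)
      _ hnd PySem.Dict.empty _ hd0 c hck]
  rw [takeWhile_ne_eq_filter_lt _ hpair c hck]
  simp only [PySem.Dict.getD_counter]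
  rw [sum_count_eq_countP _ (hnd.filter _) letters.toList]
  have hcp : letters.toList.countP
      (fun x => decide (x ∈ (PySem.List.sorted (PySem.Dict.counter letters.toList).keys
        (fun x => x) false).filter (fun u => decide (u < c))))
      = letters.toList.countP (fun x => decide (x < c)) :=
    List.countP_congr (fun x hx => by
      simp only [decide_eq_true_eq, List.mem_filter, decide_eq_true_eq]
      exact ⟨fun h => h.2, fun h => ⟨(hmem x).mpr hx, h⟩⟩)
  rw [hcp]
  have hperm := PySem.List.sorted_perm letters.toList (fun x => x) true
  have hcs : List.count c (PySem.List.sorted letters.toList (fun x => x) true)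
      = List.count c letters.toList := hperm.count_eq c
  have hcps : (PySem.List.sorted letters.toList (fun x => x) true).countP (fun x => decide (c < x))
      = letters.toList.countP (fun x => decide (c < x)) := hperm.countP_eq _
  have htri := countP_tri letters.toList c
  have hlen : (PySem.List.sorted letters.toList (fun x => x) true).length = letters.toList.length :=
    PySem.List.length_sorted _ _ _
  by_cases hk : 0 ≤ k
  · rw [PySem.List.slice_to _ hk, if_pos hk]
    have htake := count_take_sorted _ hdesc k.toNat c
    rw [hcs, hcps] at htake
    rw [htake]
    omega
  · have hkk : 0 < (-k).toNat := by omega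
    have hk' : (some k) = (some (-(((-k).toNat : Nat) : Int))) := by
      congr 1; omega
    rw [hk', PySem.List.slice_to_neg_natCast _ _ hkk, if_neg hk]
    have htake := count_take_sorted _ hdesc
      ((PySem.List.sorted letters.toList (fun x => x) true).length - (-k).toNat) c
    rw [hcs, hcps] at htake
    rw [htake]
    omega

-- ===== VERDICT (by name: the statement is the Claim_ definition above) =====
theorem solution_spec : Claim_equal_solution := by
  intro letters k _
  unfold Spec_solution
  exact solution_eq letters k
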